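-- pv_equiv track=rewrite | github.com/enperry/csprojects | google foobar/cake.py | solution
-- ===== SOURCE A (Python) =====
-- def solution(s):
--     # checking for edge cases
--     if(len(s) == 0):
--         return 0
--     elif(len(set(s)) == 1):
--         return len(s)
--     # the actual algo
--     for i in range(0, len(s)):
--         slice = s[:i]
--         count = s.count(slice)
--         if(len(slice) > len(s) / 2):
--             return 1
--         if(count * len(slice) == len(s)):
--             return count
-- ===== SOURCE B (Python) =====
-- def solution(s):
--     n = len(s)
--     if n == 0:
--         return 0
--     for d in range(1, n + 1):
--         if n % d == 0 and s[:d] * (n // d) == s: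
--             return n // d
-- ===== Notes on version B (the rewrite author's own statement) =====
-- stated objective: faster
-- what changed: B replaces A's scan over all prefix lengths with str.count on each (quadratic on strings whose answer is 1) by a scan over the divisors d of len(s) only, checking s == s[:d]*(n//d) directly, with no count() and no half-length cutoff.
-- outside the precondition, e.g. on solution('ab'): A returns None, B returns 1
import Mathlib
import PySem

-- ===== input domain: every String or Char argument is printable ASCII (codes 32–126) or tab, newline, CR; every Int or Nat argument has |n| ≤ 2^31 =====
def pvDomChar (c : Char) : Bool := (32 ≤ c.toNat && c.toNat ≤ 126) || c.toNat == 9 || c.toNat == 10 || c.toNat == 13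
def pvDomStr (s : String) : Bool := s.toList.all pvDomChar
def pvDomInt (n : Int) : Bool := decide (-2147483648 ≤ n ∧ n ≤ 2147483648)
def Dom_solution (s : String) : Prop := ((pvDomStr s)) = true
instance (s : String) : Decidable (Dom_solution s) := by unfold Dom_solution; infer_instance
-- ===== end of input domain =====

-- B scans only the divisors d of len(s) and compares s with s[:d]*(n//d) directly,
-- instead of A's prefix scan with str.count (objective: faster).


-- ===== PORT A =====
-- the 'for i in range(0, len(s))' loop; when Python falls off the end it returns
-- None (no Int value) — those inputs are excluded by Pre_solution, the port returns 0 there.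
def solutionLoop (cs : List Char) (i : Nat) : Int :=
  if h : i < cs.length then
    let slc := PySem.List.slice cs none (some (i : Int))      -- slice = s[:i]
    let cnt := PySem.Chars.count cs slc                       -- count = s.count(slice)
    -- 'len(slice) > len(s) / 2' uses Python float division; exact as 2*len(slice) > len(s)
    if 2 * slc.length > cs.length then 1
    else if cnt * slc.length = cs.length then (cnt : Int)
    else solutionLoop cs (i + 1)
  else 0
termination_by cs.length - i

def solution (s : String) : Int :=
  if PySem.Str.len s = 0 then 0
  else if (PySem.Set.ofList s.toList).length = 1 then PySem.Str.len s   -- len(set(s)) == 1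
  else solutionLoop s.toList 0

-- ===== PORT B =====
-- the 'for d in range(1, n + 1)' loop of Source B; d = n always fires, the 'else 0' is unreachable
def altLoop (cs : List Char) (d : Nat) : Int :=
  if h : d ≤ cs.length then
    if cs.length % d = 0 ∧
        (List.replicate (cs.length / d) (PySem.List.slice cs none (some (d : Int)))).flatten = cs then
      ((cs.length / d : Nat) : Int)
    else altLoop cs (d + 1)
  else 0
termination_by cs.length + 1 - d

def solution_alt (s : String) : Int :=
  if s.toList.length = 0 then 0
  else altLoop s.toList 1

-- ===== PRECONDITION & SPEC =====
-- Pre_ excludes strings of length 2 with two distinct characters: there A's loop ends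
-- without returning and Python yields None, which is not an Int.
def Pre_solution (s : String) : Prop := s.toList.length = 2 → s.toList[0]? = s.toList[1]?
instance (s : String) : Decidable (Pre_solution s) := by unfold Pre_solution; infer_instance

def pvWitness_solution : String := "abab"

def Spec_solution (s : String) (out : Int) : Prop := out = solution_alt s
instance (s : String) (out : Int) : Decidable (Spec_solution s out) := by unfold Spec_solution; infer_instance

-- ===== CLAIM (what is proved, stated in full; the proofs are below) =====
def Claim_equal_solution : Prop := ∀ (s : String), Dom_solution s → Pre_solution s → Spec_solution s (solution s)

-- ===== LEMMAS AND PROOFS =====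

-- 'd is a tiling divisor of cs': d ≥ 1, d ∣ |cs| and cs is |cs|/d copies of its prefix of length d
def tileQ (cs : List Char) (d : Nat) : Bool :=
  1 ≤ d && cs.length % d == 0 && ((List.replicate (cs.length / d) (cs.take d)).flatten == cs)

theorem tileQ_iff (cs : List Char) (d : Nat) :
    tileQ cs d = true ↔ 1 ≤ d ∧ cs.length % d = 0 ∧ (List.replicate (cs.length / d) (cs.take d)).flatten = cs := by
  simp [tileQ, and_assoc]

theorem tileQ_length (cs : List Char) (h : cs.length ≠ 0) : tileQ cs cs.length = true := by
  rw [tileQ_iff]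
  refine ⟨by omega, by simp, ?_⟩
  rw [Nat.div_self (by omega)]
  simp

-- equations of PySem.Chars.count.go (the engine of Python's str.count)
theorem go_zero (sub l : List Char) (acc : Nat) : PySem.Chars.count.go sub 0 l acc = acc := by
  rw [PySem.Chars.count.go]

theorem go_nil (sub : List Char) (f acc : Nat) : PySem.Chars.count.go sub f [] acc = acc := by
  cases f with
  | zero => rw [PySem.Chars.count.go]
  | succ f => rw [PySem.Chars.count.go]; omega

theorem go_cons (sub : List Char) (fuel : Nat) (t : List Char) (c : Char) (acc : Nat) :
    PySem.Chars.count.go sub (fuel+1) (c :: t) acc =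
      (if sub.isPrefixOf (c :: t) then PySem.Chars.count.go sub fuel (List.drop sub.length (c :: t)) (acc+1)
       else PySem.Chars.count.go sub fuel t acc) := by
  rw [PySem.Chars.count.go]

theorem go_acc (sub : List Char) (fuel : Nat) (l : List Char) (acc : Nat) :
    PySem.Chars.count.go sub fuel l acc = acc + PySem.Chars.count.go sub fuel l 0 := by
  induction fuel generalizing l acc with
  | zero => simp [go_zero]
  | succ f ih =>
    cases l with
    | nil => simp [go_nil]
    | cons c t =>
      rw [go_cons, go_cons]
      split
      · rw [ih _ (acc+1), ih _ 1]; omega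
      · rw [ih _ acc, ih _ 0]

theorem go_le (sub : List Char) (hs : sub ≠ []) (fuel : Nat) (l : List Char) (hf : l.length ≤ fuel) :
    PySem.Chars.count.go sub fuel l 0 * sub.length ≤ l.length ∧
      (PySem.Chars.count.go sub fuel l 0 * sub.length = l.length →
        (List.replicate (PySem.Chars.count.go sub fuel l 0) sub).flatten = l) := by
  have hs1 : 1 ≤ sub.length := by
    cases sub with
    | nil => exact absurd rfl hs
    | cons a b => simp
  induction fuel generalizing l with
  | zero =>
    have : l = [] := List.length_eq_zero_iff.mp (by omega)
    subst this
    simp [go_zero]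
  | succ f ih =>
    cases l with
    | nil => simp [go_nil]
    | cons c t =>
      rw [go_cons]
      split
      · rename_i hP
        obtain ⟨rest, hrest⟩ := List.isPrefixOf_iff_prefix.mp hP
        have hdrop : List.drop sub.length (c :: t) = rest := by
          rw [← hrest, List.drop_left]
        rw [hdrop, go_acc]
        have hlen : (c :: t).length = sub.length + rest.length := by
          rw [← hrest, List.length_append]
        have hrf : rest.length ≤ f := by
          have := List.length_cons (a := c) (as := t)
          omega
        obtain ⟨ihle, iheq⟩ := ih rest hrf
        constructor
        · calc (0 + 1 + PySem.Chars.count.go sub f rest 0) * sub.length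
              = sub.length + PySem.Chars.count.go sub f rest 0 * sub.length := by ring
          _ ≤ sub.length + rest.length := by omega
          _ = (c :: t).length := hlen.symm
        · intro heq
          have heq' : PySem.Chars.count.go sub f rest 0 * sub.length = rest.length := by
            have : (0 + 1 + PySem.Chars.count.go sub f rest 0) * sub.length
                = sub.length + PySem.Chars.count.go sub f rest 0 * sub.length := by ring
            omega
          have hfl := iheq heq'
          rw [show (0 + 1 + PySem.Chars.count.go sub f rest 0)
                = PySem.Chars.count.go sub f rest 0 + 1 from by omega,
              List.replicate_succ, List.flatten_cons, hfl, hrest]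
      · have hlt : t.length ≤ f := by
          have := List.length_cons (a := c) (as := t)
          omega
        obtain ⟨ihle, _⟩ := ih t hlt
        constructor
        · calc PySem.Chars.count.go sub f t 0 * sub.length ≤ t.length := ihle
          _ ≤ (c :: t).length := by simp
        · intro heq
          exfalso
          have : (c :: t).length = t.length + 1 := by simp
          omega

theorem go_tile (sub : List Char) (hs : sub ≠ []) (k fuel : Nat) (hf : k ≤ fuel) :
    PySem.Chars.count.go sub fuel ((List.replicate k sub).flatten) 0 = k := by
  induction k generalizing fuel with
  | zero => cases fuel <;> simp [go_nil]
  | succ k ih =>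
    cases fuel with
    | zero => omega
    | succ f =>
      cases sub with
      | nil => exact absurd rfl hs
      | cons c0 st =>
        rw [List.replicate_succ, List.flatten_cons, List.cons_append, go_cons]
        have hpre : (c0 :: st).isPrefixOf (c0 :: (st ++ (List.replicate k (c0 :: st)).flatten)) = true := by
          rw [← List.cons_append]
          exact List.isPrefixOf_iff_prefix.mpr (List.prefix_append _ _)
        rw [if_pos hpre, ← List.cons_append, List.drop_left, go_acc]
        rw [ih f (by omega)]
        omega

theorem count_go_form (cs : List Char) (i : Nat) (h1 : 1 ≤ i) (h2 : i ≤ cs.length) :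
    PySem.Chars.count cs (cs.take i) = PySem.Chars.count.go (cs.take i) cs.length cs 0 := by
  have : (cs.take i) ≠ [] := by
    apply List.ne_nil_of_length_pos
    rw [List.length_take]
    omega
  simp [PySem.Chars.count, this]

theorem take_ne_nil (cs : List Char) (i : Nat) (h1 : 1 ≤ i) (h2 : i ≤ cs.length) :
    cs.take i ≠ [] := by
  apply List.ne_nil_of_length_pos
  rw [List.length_take]
  omega

theorem count_of_tile (cs : List Char) (i : Nat) (h1 : 1 ≤ i) (h2 : i ≤ cs.length)
    (h : tileQ cs i = true) : PySem.Chars.count cs (cs.take i) = cs.length / i := by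
  obtain ⟨-, hmod, htile⟩ := (tileQ_iff cs i).mp h
  rw [count_go_form cs i h1 h2]
  calc PySem.Chars.count.go (cs.take i) cs.length cs 0
      = PySem.Chars.count.go (cs.take i) cs.length
          ((List.replicate (cs.length / i) (cs.take i)).flatten) 0 := by rw [htile]
    _ = cs.length / i := go_tile _ (take_ne_nil cs i h1 h2) _ _ (Nat.div_le_self _ _)

theorem count_mul_eq_iff (cs : List Char) (i : Nat) (h1 : 1 ≤ i) (h2 : i ≤ cs.length) :
    (PySem.Chars.count cs (cs.take i) * i = cs.length) ↔ tileQ cs i = true := by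
  have htl : (cs.take i).length = i := by rw [List.length_take]; omega
  constructor
  · intro h
    rw [count_go_form cs i h1 h2] at h
    obtain ⟨-, heq⟩ := go_le (cs.take i) (take_ne_nil cs i h1 h2) cs.length cs le_rfl
    rw [htl] at heq
    have hfl := heq h
    rw [tileQ_iff]
    refine ⟨h1, ?_, ?_⟩
    · rw [← h]; exact Nat.mul_mod_left _ _
    · have hdiv : cs.length / i = PySem.Chars.count.go (cs.take i) cs.length cs 0 :=
        Nat.div_eq_of_eq_mul_left (by omega) h.symm
      rw [hdiv]; exact hfl
  · intro h
    have hc := count_of_tile cs i h1 h2 h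
    obtain ⟨-, hmod, -⟩ := (tileQ_iff cs i).mp h
    rw [hc, Nat.div_mul_cancel (Nat.dvd_of_mod_eq_zero hmod)]

theorem setLen_one_iff (cs : List Char) :
    (PySem.Set.ofList cs).length = 1 ↔ ∃ c, cs ≠ [] ∧ ∀ x ∈ cs, x = c := by
  constructor
  · intro h
    obtain ⟨c, hc⟩ := List.length_eq_one_iff.mp h
    refine ⟨c, ?_, ?_⟩
    · intro hnil
      subst hnil
      exact absurd h (by decide)
    · intro x hx
      have hx' : x ∈ PySem.Set.ofList cs := PySem.Set.mem_ofList _ _ |>.mpr hx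
      rw [hc] at hx'
      simpa using hx'
  · rintro ⟨c, hne, hall⟩
    have hc : c ∈ cs := by
      cases cs with
      | nil => exact absurd rfl hne
      | cons a t =>
        have := hall a (List.mem_cons_self ..)
        rw [← this]
        exact List.mem_cons_self ..
    have hcS : c ∈ PySem.Set.ofList cs := PySem.Set.mem_ofList _ _ |>.mpr hc
    have hallS : ∀ x ∈ PySem.Set.ofList cs, x = c := fun x hx => hall x ((PySem.Set.mem_ofList _ _).mp hx)
    have hrep := List.eq_replicate_length.mpr hallS
    have hnd : (PySem.Set.ofList cs).Nodup := PySem.Set.nodup_ofList _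
    rw [hrep] at hnd
    have hle := List.nodup_replicate.mp hnd
    have hge : 0 < (PySem.Set.ofList cs).length := List.length_pos_of_mem hcS
    omega

theorem flatten_replicate_singleton (n : Nat) (c : Char) :
    (List.replicate n [c]).flatten = List.replicate n c := by
  induction n with
  | zero => rfl
  | succ n ih => simp [List.replicate_succ, ih]

theorem altLoop_eq (cs : List Char) (hn : cs.length ≠ 0) (hex : ∃ d, tileQ cs d = true)
    (d : Nat) (hd1 : 1 ≤ d) (hdm : d ≤ Nat.find hex) :
    altLoop cs d = ((cs.length / Nat.find hex : Nat) : Int) := by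
  have hmle : Nat.find hex ≤ cs.length := Nat.find_le (tileQ_length cs hn)
  suffices H : ∀ k d, 1 ≤ d → d ≤ Nat.find hex → Nat.find hex - d ≤ k →
      altLoop cs d = ((cs.length / Nat.find hex : Nat) : Int) from H _ d hd1 hdm le_rfl
  intro k
  induction k with
  | zero =>
    intro d hd1 hdm hk
    have hd : d = Nat.find hex := by omega
    subst hd
    obtain ⟨-, hmod, htile⟩ := (tileQ_iff _ _).mp (Nat.find_spec hex)
    rw [altLoop, dif_pos hmle]
    rw [if_pos ⟨hmod, by rw [PySem.List.slice_to_natCast]; exact htile⟩]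
  | succ k ih =>
    intro d hd1 hdm hk
    by_cases hdm' : d = Nat.find hex
    · exact ih d hd1 hdm (by omega)
    · have hlt : d < Nat.find hex := by omega
      rw [altLoop, dif_pos (by omega)]
      rw [if_neg ?_, ih (d + 1) (by omega) (by omega) (by omega)]
      rintro ⟨hmod, htile⟩
      rw [PySem.List.slice_to_natCast] at htile
      exact Nat.find_min hex hlt ((tileQ_iff _ _).mpr ⟨hd1, hmod, htile⟩)

theorem tileQ_not_of_lt_find (cs : List Char) (hex : ∃ d, tileQ cs d = true)
    (i : Nat) (h1 : 1 ≤ i) (hi : i < Nat.find hex) (h2 : i ≤ cs.length) :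
    ¬ (PySem.Chars.count cs (cs.take i) * (cs.take i).length = cs.length) := by
  have htl : (cs.take i).length = i := by rw [List.length_take]; omega
  rw [htl]
  intro h
  exact Nat.find_min hex hi ((count_mul_eq_iff cs i h1 h2).mp h)

theorem solutionLoop_ret1 (cs : List Char) (i : Nat) (hilt : i < cs.length)
    (hbig : 2 * i > cs.length) : solutionLoop cs i = 1 := by
  rw [solutionLoop]
  simp only [dif_pos hilt, PySem.List.slice_to_natCast]
  rw [if_pos (by rw [List.length_take]; omega)]

theorem solutionLoop_at_find (cs : List Char) (_hn : cs.length ≠ 0) (hex : ∃ d, tileQ cs d = true)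
    (h2 : 2 * Nat.find hex ≤ cs.length) :
    solutionLoop cs (Nat.find hex) = ((cs.length / Nat.find hex : Nat) : Int) := by
  have hm1 : 1 ≤ Nat.find hex := ((tileQ_iff _ _).mp (Nat.find_spec hex)).1
  obtain ⟨-, hmod, htile⟩ := (tileQ_iff _ _).mp (Nat.find_spec hex)
  have hilt : Nat.find hex < cs.length := by omega
  have htl : (cs.take (Nat.find hex)).length = Nat.find hex := by rw [List.length_take]; omega
  rw [solutionLoop]
  simp only [dif_pos hilt, PySem.List.slice_to_natCast]
  rw [if_neg (by rw [htl]; omega)]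
  rw [if_pos (by
    rw [htl, count_of_tile _ _ hm1 (by omega) (Nat.find_spec hex)]
    exact Nat.div_mul_cancel (Nat.dvd_of_mod_eq_zero hmod))]
  rw [count_of_tile _ _ hm1 (by omega) (Nat.find_spec hex)]

theorem solutionLoop_eq_small (cs : List Char) (hn : cs.length ≠ 0) (hex : ∃ d, tileQ cs d = true)
    (h2 : 2 * Nat.find hex ≤ cs.length)
    (i : Nat) (hi : i ≤ Nat.find hex) :
    solutionLoop cs i = ((cs.length / Nat.find hex : Nat) : Int) := by
  have hm1 : 1 ≤ Nat.find hex := ((tileQ_iff _ _).mp (Nat.find_spec hex)).1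
  suffices H : ∀ k j, j ≤ Nat.find hex → Nat.find hex - j ≤ k →
      solutionLoop cs j = ((cs.length / Nat.find hex : Nat) : Int) from H _ i hi le_rfl
  intro k
  induction k with
  | zero =>
    intro j hj hk
    have hjeq : j = Nat.find hex := by omega
    rw [hjeq]
    exact solutionLoop_at_find cs hn hex h2
  | succ k ih =>
    intro j hj hk
    by_cases hjeq : j = Nat.find hex
    · rw [hjeq]
      exact solutionLoop_at_find cs hn hex h2
    · have hjlt : j < Nat.find hex := by omega
      have hjn : j < cs.length := by omega
      rw [solutionLoop]
      simp only [dif_pos hjn, PySem.List.slice_to_natCast]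
      have htl : (cs.take j).length = j := by rw [List.length_take]; omega
      rw [if_neg (by rw [htl]; omega)]
      by_cases hj0 : j = 0
      · subst hj0
        rw [if_neg (by simp; omega)]
        exact ih 1 (by omega) (by omega)
      · rw [if_neg (tileQ_not_of_lt_find cs hex j (by omega) hjlt (by omega))]
        exact ih (j + 1) (by omega) (by omega)

theorem solutionLoop_eq_big (cs : List Char) (hn : 3 ≤ cs.length) (hex : ∃ d, tileQ cs d = true)
    (h2 : Nat.find hex = cs.length)
    (i : Nat) (hi : i ≤ cs.length / 2 + 1) :
    solutionLoop cs i = 1 := by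
  suffices H : ∀ k j, j ≤ cs.length / 2 + 1 → cs.length / 2 + 1 - j ≤ k →
      solutionLoop cs j = 1 from H _ i hi le_rfl
  intro k
  induction k with
  | zero =>
    intro j hj hk
    have hjeq : j = cs.length / 2 + 1 := by omega
    rw [hjeq]
    exact solutionLoop_ret1 cs _ (by omega) (by omega)
  | succ k ih =>
    intro j hj hk
    by_cases hbig : 2 * j > cs.length
    · exact solutionLoop_ret1 cs _ (by omega) hbig
    · have hjn : j < cs.length := by omega
      rw [solutionLoop]
      simp only [dif_pos hjn, PySem.List.slice_to_natCast]
      have htl : (cs.take j).length = j := by rw [List.length_take]; omega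
      rw [if_neg (by rw [htl]; omega)]
      by_cases hj0 : j = 0
      · subst hj0
        rw [if_neg (by simp; omega)]
        exact ih 1 (by omega) (by omega)
      · rw [if_neg (tileQ_not_of_lt_find cs hex j (by omega) (by omega) (by omega))]
        exact ih (j + 1) (by omega) (by omega)

theorem two_mul_gt_imp_eq (m n : Nat) (hdvd : m ∣ n) (_hm : 1 ≤ m) (hle : m ≤ n) (hgt : n < 2 * m) :
    m = n := by
  obtain ⟨q, hq⟩ := hdvd
  rcases q with _ | _ | q
  · omega
  · omega
  · have h2 : m * 2 ≤ m * (q + 1 + 1) := Nat.mul_le_mul_left m (by omega)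
    omega

theorem solution_eq_alt (s : String) (hpre : Pre_solution s) : solution s = solution_alt s := by
  have hlen : PySem.Str.len s = (s.toList.length : Int) := by simp [pysem]
  unfold solution solution_alt
  rw [hlen]
  by_cases h0 : s.toList.length = 0
  · rw [if_pos (by exact_mod_cast congrArg (Nat.cast : Nat → Int) h0), if_pos h0]
  · rw [if_neg (by exact_mod_cast h0), if_neg h0]
    have hex : ∃ d, tileQ s.toList d = true := ⟨_, tileQ_length _ h0⟩
    have hm1 : 1 ≤ Nat.find hex := ((tileQ_iff _ _).mp (Nat.find_spec hex)).1
    have hmle : Nat.find hex ≤ s.toList.length := Nat.find_le (tileQ_length _ h0)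
    have hB : altLoop s.toList 1 = ((s.toList.length / Nat.find hex : Nat) : Int) :=
      altLoop_eq s.toList h0 hex 1 le_rfl hm1
    by_cases hset : (PySem.Set.ofList s.toList).length = 1
    · rw [if_pos hset, hB]
      obtain ⟨c, hne, hall⟩ := (setLen_one_iff s.toList).mp hset
      have hrep : s.toList = List.replicate s.toList.length c := List.eq_replicate_length.mpr hall
      have ht1 : tileQ s.toList 1 = true := by
        rw [tileQ_iff]
        refine ⟨le_rfl, Nat.mod_one _, ?_⟩
        rw [Nat.div_one]
        have htake : s.toList.take 1 = [c] := by
          rw [hrep, List.take_replicate,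
            show min 1 s.toList.length = 1 from by omega, List.replicate_one]
        rw [htake, flatten_replicate_singleton]
        exact hrep.symm
      have hmeq : Nat.find hex = 1 := le_antisymm (Nat.find_le ht1) hm1
      rw [hmeq, Nat.div_one]
    · rw [if_neg hset]
      -- here s has at least two distinct characters; with Pre_, its length is ≥ 3
      have hn3 : 3 ≤ s.toList.length := by
        by_contra hlt
        push Not at hlt
        rcases hcs : s.toList with _ | ⟨a, t⟩
        · exact h0 (by rw [hcs]; rfl)
        · rcases t with _ | ⟨b, t2⟩
          · apply hset
            rw [hcs]
            exact (setLen_one_iff _).mpr ⟨a, by simp, by simp⟩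
          · rcases t2 with _ | ⟨c, t3⟩
            · have hab : a = b := by
                have hp := hpre (by rw [hcs]; rfl)
                rw [hcs] at hp
                simpa using hp
              apply hset
              rw [hcs]
              exact (setLen_one_iff _).mpr ⟨b, by simp, by simp [hab]⟩
            · have hlen3 := congrArg List.length hcs
              simp only [List.length_cons] at hlen3
              omega
      by_cases h2m : 2 * Nat.find hex ≤ s.toList.length
      · rw [solutionLoop_eq_small s.toList h0 hex h2m 0 (by omega), hB]
      · have hmn : Nat.find hex = s.toList.length :=
          two_mul_gt_imp_eq _ _ (Nat.dvd_of_mod_eq_zero ((tileQ_iff _ _).mp (Nat.find_spec hex)).2.1)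
            hm1 hmle (by omega)
        rw [solutionLoop_eq_big s.toList hn3 hex hmn 0 (by omega), hB, hmn,
          Nat.div_self (by omega)]
        rfl

-- ===== VERDICT (by name: the statement is the Claim_ definition above) =====
theorem solution_spec : Claim_equal_solution := by
  intro s _ hpre
  unfold Spec_solution
  exact solution_eq_alt s hpre
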